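-- pv_equiv track=rewrite | github.com/PeterWolf-tw/ESOE-CS101-2015 | B04505008_HW04.py | condOR
-- ===== SOURCE A (Python) =====
-- def condOR(inputSTR_X, inputSTR_Y):
--     outputSTR =""
--     for a , b in zip(inputSTR_X , inputSTR_Y):
--         if a and b == "0":
--             outputSTR += "0"
--         else:
--             outputSTR += "1"
--     return outputSTR
-- ===== SOURCE B (Python) =====
-- import re
--
-- def condOR(inputSTR_X, inputSTR_Y):
--     # a (a one-char string) is always truthy, so the result depends only on
--     # Y truncated to len(X): keep '0', replace everything else by '1'.
--     return re.sub(r'[^0]', '1', inputSTR_Y[:len(inputSTR_X)])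
-- ===== Notes on version B (the rewrite author's own statement) =====
-- stated objective: simpler
-- what changed: Replaces the per-character zip loop with string concatenation by one slice of Y to len(X) plus a single bulk regex substitution mapping every non-'0' character to '1'.
import Mathlib
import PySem

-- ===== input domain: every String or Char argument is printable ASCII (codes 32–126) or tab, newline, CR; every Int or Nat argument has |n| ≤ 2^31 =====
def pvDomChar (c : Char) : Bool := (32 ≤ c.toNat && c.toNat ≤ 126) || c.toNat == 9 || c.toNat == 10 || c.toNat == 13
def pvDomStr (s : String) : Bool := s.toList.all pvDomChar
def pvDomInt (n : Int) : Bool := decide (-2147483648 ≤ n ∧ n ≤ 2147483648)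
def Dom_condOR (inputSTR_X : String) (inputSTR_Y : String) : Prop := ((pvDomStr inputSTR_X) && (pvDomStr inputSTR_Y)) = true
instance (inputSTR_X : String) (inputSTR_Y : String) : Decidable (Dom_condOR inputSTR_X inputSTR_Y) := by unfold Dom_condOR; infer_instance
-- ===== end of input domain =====

-- B replaces A's per-character zip loop (string concatenation) by one slice of Y
-- to len(X) followed by a single bulk map '0'↦'0' / other↦'1' (re.sub): simpler.


-- ===== PORT A =====
-- loop over zip(X, Y), appending "0" when (a is truthy and) b == "0", else "1";
-- a one-char string a is always truthy, transliterated as String.ofList [p.1] ≠ "".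
def condORgo (ps : List (Char × Char)) (outputSTR : String) : String :=
  match ps with
  | [] => outputSTR
  | p :: rest =>
      condORgo rest (outputSTR ++ (if String.ofList [p.1] ≠ "" ∧ p.2 = '0' then "0" else "1"))

def condOR (inputSTR_X : String) (inputSTR_Y : String) : String :=
  condORgo (inputSTR_X.toList.zip inputSTR_Y.toList) ""

-- ===== PORT B =====
-- slice Y[:len(X)], then bulk-substitute every non-'0' character by '1' (re.sub r'[^0]')
def condOR_alt (inputSTR_X : String) (inputSTR_Y : String) : String :=
  String.ofList (((PySem.List.slice inputSTR_Y.toList (some 0) (some (Int.ofNat inputSTR_X.toList.length)) : List Char).map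
    (fun c => if c ≠ '0' then '1' else c)))

-- ===== PRECONDITION & SPEC =====
def Spec_condOR (inputSTR_X : String) (inputSTR_Y : String) (out : String) : Prop := out = condOR_alt inputSTR_X inputSTR_Y
instance (inputSTR_X : String) (inputSTR_Y : String) (out : String) : Decidable (Spec_condOR inputSTR_X inputSTR_Y out) := by unfold Spec_condOR; infer_instance

-- ===== CLAIM (what is proved, stated in full; the proofs are below) =====
def Claim_equal_condOR : Prop := ∀ (inputSTR_X : String) (inputSTR_Y : String), Dom_condOR inputSTR_X inputSTR_Y → Spec_condOR inputSTR_X inputSTR_Y (condOR inputSTR_X inputSTR_Y)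

-- ===== LEMMAS AND PROOFS =====

theorem step_char (p : Char × Char) :
    (if String.ofList [p.1] ≠ "" ∧ p.2 = '0' then ("0":String) else "1")
      = String.ofList [if p.2 ≠ '0' then '1' else p.2] := by
  by_cases h : p.2 = '0'
  · simp [h]
  · simp [h]

theorem condORgo_eq (ps : List (Char × Char)) (acc : String) :
    condORgo ps acc = acc ++ String.ofList (ps.map (fun p => if p.2 ≠ '0' then '1' else p.2)) := by
  induction ps generalizing acc with
  | nil => simp [condORgo]
  | cons p rest ih =>
      simp only [condORgo, List.map]
      rw [ih, step_char, String.append_assoc, ← String.ofList_append]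
      rfl

theorem zip_snd_take (xs ys : List Char) :
    (xs.zip ys).map Prod.snd = ys.take xs.length := by
  induction xs generalizing ys with
  | nil => simp
  | cons x xs ih =>
      cases ys with
      | nil => simp
      | cons y ys => simp [ih]

-- ===== VERDICT (by name: the statement is the Claim_ definition above) =====
theorem condOR_spec : Claim_equal_condOR := by
  intro x y _
  unfold Spec_condOR condOR condOR_alt
  rw [condORgo_eq]
  have h2 : (x.toList.zip y.toList).map (fun p => if p.2 ≠ '0' then '1' else p.2)
      = (y.toList.take x.toList.length).map (fun c => if c ≠ '0' then '1' else c) := by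
    rw [← zip_snd_take, List.map_map]; rfl
  rw [h2]
  have h3 : (PySem.List.slice y.toList (some 0) (some (Int.ofNat x.toList.length)) : List Char)
      = y.toList.take x.toList.length := by
    simp
  rw [h3, List.map_take]
  simp
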